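-- pv_equiv track=rewrite | github.com/Vinnu2003/DAA | 23.py | counter_mode
-- ===== SOURCE A (Python) =====
-- def sdes_encrypt(plaintext_block, key):
--     # Your S-DES encryption logic here
--     # ...
--
--     # Example implementation (replace this with your S-DES logic)
--     encrypted_block = "encrypted"  # Placeholder for encryption
--
--     return encrypted_block
--
-- def counter_mode(plaintext, key, counter):
--     encrypted = ""
--     block_size = 8  # Assuming a block size of 8 bits (for S-DES)
--
--     for i in range(0, len(plaintext), block_size):
--         plaintext_block = plaintext[i:i+block_size]
--         encrypted_counter = sdes_encrypt(format(counter, '08b'), key)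
--
--         # XOR plaintext block with encrypted counter
--         encrypted_block = ''.join(chr(ord(a) ^ ord(b)) for a, b in zip(plaintext_block, encrypted_counter))
--         encrypted += encrypted_block
--
--         # Increment counter for the next block
--         counter += 1
--
--     return encrypted
-- ===== SOURCE B (Python) =====
-- def sdes_encrypt(plaintext_block, key):
--     # Your S-DES encryption logic here
--     # ...
--
--     # Example implementation (replace this with your S-DES logic)
--     encrypted_block = "encrypted"  # Placeholder for encryption
--
--     return encrypted_block
--
-- def counter_mode(plaintext, key, counter):
--     # Flat CTR sweep: character i belongs to block i // 8, whose keystream is the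
--     # encryption of that block's counter value; XOR with keystream position i % 8.
--     out = []
--     for i, c in enumerate(plaintext):
--         keystream = sdes_encrypt(format(counter + i // 8, '08b'), key)
--         out.append(chr(ord(c) ^ ord(keystream[i % 8])))
--     return ''.join(out)
-- ===== Notes on version B (the rewrite author's own statement) =====
-- stated objective: simpler
-- what changed: Replaced the block-sliced loop (8-char slices, per-block zip, mutable counter increments, string concatenation) with a single flat enumerate pass: character i is XORed with position i % 8 of the keystream obtained by encrypting counter + i // 8.
import Mathlib
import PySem

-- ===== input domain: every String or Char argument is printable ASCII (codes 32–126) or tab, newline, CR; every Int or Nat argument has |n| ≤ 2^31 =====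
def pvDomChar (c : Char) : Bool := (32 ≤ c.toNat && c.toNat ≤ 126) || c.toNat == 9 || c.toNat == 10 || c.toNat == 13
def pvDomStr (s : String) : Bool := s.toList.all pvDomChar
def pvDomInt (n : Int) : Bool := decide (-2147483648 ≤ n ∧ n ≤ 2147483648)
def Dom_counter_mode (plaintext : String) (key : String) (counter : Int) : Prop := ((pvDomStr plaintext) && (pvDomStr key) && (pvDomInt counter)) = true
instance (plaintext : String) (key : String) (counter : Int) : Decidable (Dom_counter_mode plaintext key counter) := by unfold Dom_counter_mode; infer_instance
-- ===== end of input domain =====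

-- B replaces A's block slicing + per-block zip loop with one flat enumerate sweep XORing
-- character i with position i % 8 of the keystream for block i // 8; objective: simpler.

-- chr(ord a ^ ord b), used by both ports (the identical Python expression appears in both)
def pvXor (a b : Char) : Char := Char.ofNat (a.toNat ^^^ b.toNat)

-- format(n, '08b'): binary of |n| zero-padded to total width 8 (sign included); its value is
-- never observed since sdes_encrypt ignores its arguments
def pvFormat08b (n : Int) : String :=
  let digits := Nat.toDigits 2 n.natAbs
  String.ofList (if n < 0 then '-' :: (List.replicate (7 - digits.length) '0' ++ digits)
             else List.replicate (8 - digits.length) '0' ++ digits)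

def sdes_encrypt (_plaintext_block : String) (_key : String) : String := "encrypted"

-- ===== PORT A =====
def counter_mode (plaintext : String) (key : String) (counter : Int) : String :=
  let l := plaintext.toList
  let r := (PySem.List.pyRange 0 (l.length : Int) 8).foldl
    (fun (st : List Char × Int) i =>
      let plaintext_block := PySem.List.slice l (some i) (some (i + 8))
      let encrypted_counter := (sdes_encrypt (pvFormat08b st.2) key).toList
      let encrypted_block := (plaintext_block.zip encrypted_counter).map (fun p => pvXor p.1 p.2)
      (st.1 ++ encrypted_block, st.2 + 1))
    ([], counter)
  String.ofList r.1

-- ===== PORT B =====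
-- keystream[i % 8]: i % 8 ∈ [0, 8) and the keystream has 9 chars, so the index is always in
-- range and pyGetD's default is never used (Python raises only out of range, which cannot happen)
def counter_mode_alt (plaintext : String) (key : String) (counter : Int) : String :=
  String.ofList ((PySem.List.enumerate plaintext.toList 0).map
    (fun ic =>
      let keystream := (sdes_encrypt (pvFormat08b (counter + PySem.Int.floordiv ic.1 8)) key).toList
      pvXor ic.2 (PySem.List.pyGetD keystream (PySem.Int.mod ic.1 8) 'e')))

-- ===== PRECONDITION & SPEC =====
def Spec_counter_mode (plaintext : String) (key : String) (counter : Int) (out : String) : Prop := out = counter_mode_alt plaintext key counter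
instance (plaintext : String) (key : String) (counter : Int) (out : String) : Decidable (Spec_counter_mode plaintext key counter out) := by unfold Spec_counter_mode; infer_instance

-- ===== CLAIM (what is proved, stated in full; the proofs are below) =====
def Claim_equal_counter_mode : Prop := ∀ (plaintext : String) (key : String) (counter : Int), Dom_counter_mode plaintext key counter → Spec_counter_mode plaintext key counter (counter_mode plaintext key counter)

-- ===== LEMMAS AND PROOFS =====

def pvKS : List Char := ['e', 'n', 'c', 'r', 'y', 'p', 't', 'e', 'd']

theorem pvKS_eq : "encrypted".toList = pvKS := rfl

-- reference keystream XOR: char at global position k is XORed with pvKS[k % 8]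
def pvEnc : List Char → Nat → List Char
  | [], _ => []
  | c :: t, k => pvXor c (pvKS.getD (k % 8) 'e') :: pvEnc t (k + 1)

theorem pvEnc_shift (l : List Char) : ∀ k, pvEnc l (k + 8) = pvEnc l k := by
  induction l with
  | nil => intro k; rfl
  | cons c t ih =>
      intro k
      have h : (k + 8) % 8 = k % 8 := by omega
      simp only [pvEnc, h]
      rw [show k + 8 + 1 = (k + 1) + 8 from by omega, ih]

theorem pvEnc_append (a b : List Char) : ∀ k, pvEnc (a ++ b) k = pvEnc a k ++ pvEnc b (k + a.length) := by
  induction a with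
  | nil => intro k; simp [pvEnc]
  | cons c t ih =>
      intro k
      simp only [List.cons_append, pvEnc, ih (k + 1), List.length_cons]
      rw [show k + 1 + t.length = k + (t.length + 1) from by omega]

theorem pvEnc_block (b : List Char) : ∀ k, b.length + k ≤ 8 →
    (b.zip (pvKS.drop k)).map (fun p => pvXor p.1 p.2) = pvEnc b k := by
  induction b with
  | nil => intro k _; rfl
  | cons c t ih =>
      intro k hk
      have hk2 : t.length + 1 + k ≤ 8 := by simpa using hk
      have hlen : pvKS.length = 9 := rfl
      have hk9 : k < pvKS.length := by omega
      rw [List.drop_eq_getElem_cons hk9]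
      simp only [List.zip_cons_cons, List.map_cons, pvEnc]
      rw [Nat.mod_eq_of_lt (show k < 8 by omega), List.getD_eq_getElem _ _ hk9,
        ih (k + 1) (by omega)]

-- the keystream in B's map body is constant (sdes_encrypt ignores its arguments)
theorem alt_fun_eq (counter : Int) (key : String) :
    (fun ic : Int × Char =>
      let keystream := (sdes_encrypt (pvFormat08b (counter + PySem.Int.floordiv ic.1 8)) key).toList
      pvXor ic.2 (PySem.List.pyGetD keystream (PySem.Int.mod ic.1 8) 'e'))
    = (fun ic : Int × Char => pvXor ic.2 (PySem.List.pyGetD pvKS (PySem.Int.mod ic.1 8) 'e')) := by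
  funext ic; simp [sdes_encrypt, pvKS_eq]

-- B's flat enumerate sweep computes pvEnc
theorem alt_eq_pvEnc (l : List Char) : ∀ k : Nat,
    (PySem.List.enumerate l (k : Int)).map
      (fun ic => pvXor ic.2 (PySem.List.pyGetD pvKS (PySem.Int.mod ic.1 8) 'e')) = pvEnc l k := by
  induction l with
  | nil => intro k; rfl
  | cons c t ih =>
      intro k
      rw [PySem.List.enumerate_cons]
      have h8 : (8 : Int) = ((8 : Nat) : Int) := rfl
      have hmod : PySem.Int.mod (k : Int) 8 = ((k % 8 : Nat) : Int) := by
        rw [h8, PySem.Int.mod_natCast]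
      have hk1 : (k : Int) + 1 = ((k + 1 : Nat) : Int) := by push_cast; ring
      simp only [List.map_cons, hmod, PySem.List.pyGetD_natCast, pvEnc]
      rw [hk1, ih (k + 1)]

-- A's block fold, with the range already unfolded to List.range; extra trailing blocks are empty
theorem a_fold_eq_pvEnc (n : Nat) : ∀ (l acc : List Char) (c : Int), l.length ≤ 8 * n →
    ((List.range n).foldl
      (fun (st : List Char × Int) k =>
        (st.1 ++ (((l.drop (8 * k)).take 8).zip pvKS).map (fun p => pvXor p.1 p.2), st.2 + 1))
      (acc, c)).1 = acc ++ pvEnc l 0 := by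
  induction n with
  | zero =>
      intro l acc c hl
      have : l = [] := by
        cases l with
        | nil => rfl
        | cons a t => simp at hl
      subst this; simp [pvEnc]
  | succ n ih =>
      intro l acc c hl
      rw [List.range_succ_eq_map, List.foldl_cons, List.foldl_map]
      have hstep : ∀ (st : List Char × Int) (k : Nat),
          (st.1 ++ (((l.drop (8 * (k + 1))).take 8).zip pvKS).map (fun p => pvXor p.1 p.2), st.2 + 1)
          = (st.1 ++ ((((l.drop 8).drop (8 * k)).take 8).zip pvKS).map (fun p => pvXor p.1 p.2), st.2 + 1) := by
        intro st k
        rw [List.drop_drop, show 8 + 8 * k = 8 * (k + 1) from by omega]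
      have hfold : ((List.range n).foldl
          (fun (st : List Char × Int) k =>
            (st.1 ++ (((l.drop (8 * (k + 1))).take 8).zip pvKS).map (fun p => pvXor p.1 p.2), st.2 + 1))
          (acc ++ (((l.drop 0).take 8).zip pvKS).map (fun p => pvXor p.1 p.2), c + 1)).1
          = (acc ++ (((l.drop 0).take 8).zip pvKS).map (fun p => pvXor p.1 p.2)) ++ pvEnc (l.drop 8) 0 := by
        rw [PySem.List.foldl_congr_mem _ _ _ _ (fun st k _ => hstep st k)]
        exact ih (l.drop 8) _ (c + 1) (by simp only [List.length_drop]; omega)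
      simp only [hfold]
      have hblk : ((l.take 8).zip pvKS).map (fun p => pvXor p.1 p.2) = pvEnc (l.take 8) 0 := by
        have := pvEnc_block (l.take 8) 0 (by simp)
        simpa using this
      have hsplit : pvEnc l 0 = pvEnc (l.take 8) 0 ++ pvEnc (l.drop 8) 0 := by
        conv_lhs => rw [← List.take_append_drop 8 l]
        rw [pvEnc_append]
        by_cases h : 8 ≤ l.length
        · have hlen : (l.take 8).length = 8 := by simp; omega
          rw [hlen]
          rw [show (0 : Nat) + 8 = 0 + 8 from rfl, pvEnc_shift (l.drop 8) 0]
        · have : l.drop 8 = [] := by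
            apply List.drop_eq_nil_of_le; omega
          simp [this, pvEnc]
      rw [hsplit, List.drop_zero, hblk, List.append_assoc]

-- ===== VERDICT (by name: the statement is the Claim_ definition above) =====
theorem counter_mode_spec : Claim_equal_counter_mode := by
  intro plaintext key counter _
  unfold Spec_counter_mode counter_mode counter_mode_alt
  simp only []
  set l := plaintext.toList with hl
  rw [alt_fun_eq counter key]
  have halt : (PySem.List.enumerate l).map
      (fun ic => pvXor ic.2 (PySem.List.pyGetD pvKS (PySem.Int.mod ic.1 8) 'e')) = pvEnc l 0 := by
    simpa using alt_eq_pvEnc l 0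
  rw [halt]
  rw [PySem.List.pyRange_of_pos 0 (l.length : Int) (by norm_num)]
  rw [List.foldl_map]
  have hM : l.length ≤ 8 * (if (0 : Int) < (l.length : Int) then (((l.length : Int) - 0 + 8 - 1) / 8).toNat else 0) := by
    split
    · omega
    · omega
  have hconv : ∀ (st : List Char × Int) (k : Nat),
      (st.1 ++ (PySem.List.slice l (some (0 + 8 * (k : Int))) (some (0 + 8 * (k : Int) + 8)) |>.zip
        (sdes_encrypt (pvFormat08b st.2) key).toList).map (fun p => pvXor p.1 p.2), st.2 + 1)
      = (st.1 ++ (((l.drop (8 * k)).take 8).zip pvKS).map (fun p => pvXor p.1 p.2), st.2 + 1) := by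
    intro st k
    have h1 : (0 : Int) + 8 * (k : Int) = ((8 * k : Nat) : Int) := by push_cast; ring
    have h2 : (0 : Int) + 8 * (k : Int) + 8 = ((8 * k + 8 : Nat) : Int) := by push_cast; ring
    rw [h2, h1, PySem.List.slice_natCast]
    have h3 : 8 * k + 8 - 8 * k = 8 := by omega
    rw [h3, show (sdes_encrypt (pvFormat08b st.2) key).toList = pvKS from pvKS_eq]
  rw [PySem.List.foldl_congr_mem _ _ _ _ (fun st k _ => hconv st k)]
  rw [a_fold_eq_pvEnc _ l [] counter hM]
  simp
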